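-- pv_equiv track=rewrite | github.com/Proteinea/sampling-analysis | stat_eval_utils.py | get_position_property_frequency
-- ===== SOURCE A (Python) =====
-- from typing import Dict, Union, List, Set
--
-- HYDROPHOBIC_AMINO_ACIDS = {"A", "C", "I", "L", "M", "F", "W", "V"}
--
-- HYDROPHILIC_AMINO_ACIDS = {"R", "N", "D", "Q", "E", "K"}
--
-- AROMATIC_AMINO_ACIDS = {"F", "W", "Y"}
--
-- SMALL_AMINO_ACIDS = {"A", "G", "S", "T"}
--
-- POSITIVE_AMINO_ACIDS = {"R", "K", "H"}
--
-- NEGATIVE_AMINO_ACIDS = {"D", "E"}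
--
-- ALIPHATIC_AMINO_ACIDS = {"G", "A", "V", "L", "I", "M"}
--
-- HYDROXY_AMINO_ACIDS = {"S", "T", "Y"}
--
-- POLAR_UNCHARGED_AMINO_ACIDS = {"N", "Q", "S", "T", "Y"}
--
-- def classify_amino_acids_properties(protein_sequence):
--     """Tests an amino acid for all of the given properties.
--
--     Args:
--     protein_sequence: A string representing the protein sequence.
--     amino_acid: A string representing the amino acid to test.
--
--     Returns:
--     A dictionary mapping property names to boolean values, indicating whether the amino acid has the given property.
--     """
--     sequence_properties= []
--     for amino_acid in protein_sequence:
--         properties = {}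
--
--         # Hydrophobicity
--         properties["hydrophobic"] = amino_acid in HYDROPHOBIC_AMINO_ACIDS
--
--         # Hydrophilicity
--         properties["hydrophilic"] = amino_acid in HYDROPHILIC_AMINO_ACIDS
--
--         # Aromaticity
--         properties["aromatic"] = amino_acid in AROMATIC_AMINO_ACIDS
--
--         # Size
--         properties["small"] = amino_acid in SMALL_AMINO_ACIDS
--
--         # Charge
--         properties["positive"] = amino_acid in POSITIVE_AMINO_ACIDS
--         properties["negative"] = amino_acid in NEGATIVE_AMINO_ACIDS
--
--         # Aliphaticity
--         properties["aliphatic"] = amino_acid in ALIPHATIC_AMINO_ACIDS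
--
--         # Hydroxylation
--         properties["hydroxy"] = amino_acid in HYDROXY_AMINO_ACIDS
--
--         # Polarity
--
--         properties["polar_uncharged"] = (
--             amino_acid in POLAR_UNCHARGED_AMINO_ACIDS and not properties["positive"] and not properties["negative"])
--         properties["charged"] = properties["positive"] or properties["negative"]
--         sequence_properties.append(properties)
--
--     return sequence_properties
--
-- def get_position_property_frequency(sequences:List[str], max_length:int):
--     positions = {
--         "hydrophobic": [],
--         "hydrophilic": [],
--         "aromatic": [],
--         "small": [],
--         "positive": [],
--         "negative": [],
--         "aliphatic": [],
--         "hydroxy": [],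
--         "polar_uncharged": [],
--         "charged": [],
--         }
--     for g in sequences:
--         properties = classify_amino_acids_properties(g)
--         for i, v in enumerate(properties):
--             for key in v.keys():
--                 if v[key]:
--                     positions[key].append(i+1)
--     return positions
-- ===== SOURCE B (Python) =====
-- HYDROPHOBIC_AMINO_ACIDS = {"A", "C", "I", "L", "M", "F", "W", "V"}
-- HYDROPHILIC_AMINO_ACIDS = {"R", "N", "D", "Q", "E", "K"}
-- AROMATIC_AMINO_ACIDS = {"F", "W", "Y"}
-- SMALL_AMINO_ACIDS = {"A", "G", "S", "T"}
-- POSITIVE_AMINO_ACIDS = {"R", "K", "H"}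
-- NEGATIVE_AMINO_ACIDS = {"D", "E"}
-- ALIPHATIC_AMINO_ACIDS = {"G", "A", "V", "L", "I", "M"}
-- HYDROXY_AMINO_ACIDS = {"S", "T", "Y"}
-- POLAR_UNCHARGED_AMINO_ACIDS = {"N", "Q", "S", "T", "Y"}
--
-- def get_position_property_frequency(sequences, max_length):
--     # Property-first: one membership set per property key (deriving the two
--     # composite keys by set algebra), then a flat comprehension per key.
--     property_sets = [
--         ("hydrophobic", HYDROPHOBIC_AMINO_ACIDS),
--         ("hydrophilic", HYDROPHILIC_AMINO_ACIDS),
--         ("aromatic", AROMATIC_AMINO_ACIDS),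
--         ("small", SMALL_AMINO_ACIDS),
--         ("positive", POSITIVE_AMINO_ACIDS),
--         ("negative", NEGATIVE_AMINO_ACIDS),
--         ("aliphatic", ALIPHATIC_AMINO_ACIDS),
--         ("hydroxy", HYDROXY_AMINO_ACIDS),
--         ("polar_uncharged",
--          POLAR_UNCHARGED_AMINO_ACIDS - POSITIVE_AMINO_ACIDS - NEGATIVE_AMINO_ACIDS),
--         ("charged", POSITIVE_AMINO_ACIDS | NEGATIVE_AMINO_ACIDS),
--     ]
--     return {
--         key: [i + 1 for g in sequences for i, aa in enumerate(g) if aa in s]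
--         for key, s in property_sets
--     }
-- ===== Notes on version B (the rewrite author's own statement) =====
-- stated objective: simpler
-- what changed: Property-first instead of residue-first: B keeps one membership set per property key (deriving 'polar_uncharged' and 'charged' by set algebra from the base sets) and builds each positions list with a single flat comprehension over sequences, eliminating A's per-residue 10-entry boolean dict and its per-key inner loop.
import Mathlib
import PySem

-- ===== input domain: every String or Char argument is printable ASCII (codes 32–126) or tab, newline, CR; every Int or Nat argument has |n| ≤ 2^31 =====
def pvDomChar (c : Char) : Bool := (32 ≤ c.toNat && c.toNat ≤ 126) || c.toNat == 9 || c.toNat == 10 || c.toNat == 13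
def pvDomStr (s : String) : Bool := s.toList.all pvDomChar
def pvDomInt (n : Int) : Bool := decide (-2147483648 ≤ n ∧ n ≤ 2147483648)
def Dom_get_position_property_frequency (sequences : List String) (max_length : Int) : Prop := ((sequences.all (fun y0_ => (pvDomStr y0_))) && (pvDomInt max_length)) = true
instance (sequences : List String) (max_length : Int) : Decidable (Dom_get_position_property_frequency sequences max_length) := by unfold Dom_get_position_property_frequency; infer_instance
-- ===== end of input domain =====

-- B replaces A's residue-first construction of a per-residue boolean dict with a
-- property-first flat comprehension per property key (objective: simpler/alternative).

-- ===== PORT A =====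
def HYDROPHOBIC_AMINO_ACIDS : List Char := ['A', 'C', 'I', 'L', 'M', 'F', 'W', 'V']
def HYDROPHILIC_AMINO_ACIDS : List Char := ['R', 'N', 'D', 'Q', 'E', 'K']
def AROMATIC_AMINO_ACIDS : List Char := ['F', 'W', 'Y']
def SMALL_AMINO_ACIDS : List Char := ['A', 'G', 'S', 'T']
def POSITIVE_AMINO_ACIDS : List Char := ['R', 'K', 'H']
def NEGATIVE_AMINO_ACIDS : List Char := ['D', 'E']
def ALIPHATIC_AMINO_ACIDS : List Char := ['G', 'A', 'V', 'L', 'I', 'M']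
def HYDROXY_AMINO_ACIDS : List Char := ['S', 'T', 'Y']
def POLAR_UNCHARGED_AMINO_ACIDS : List Char := ['N', 'Q', 'S', 'T', 'Y']

-- the per-residue dict `properties` built by A's inner assignments, in order
def classifyOne (amino_acid : Char) : PySem.Dict String Bool :=
  let d : PySem.Dict String Bool := PySem.Dict.empty
  let d := d.insert "hydrophobic" (HYDROPHOBIC_AMINO_ACIDS.contains amino_acid)
  let d := d.insert "hydrophilic" (HYDROPHILIC_AMINO_ACIDS.contains amino_acid)
  let d := d.insert "aromatic" (AROMATIC_AMINO_ACIDS.contains amino_acid)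
  let d := d.insert "small" (SMALL_AMINO_ACIDS.contains amino_acid)
  let d := d.insert "positive" (POSITIVE_AMINO_ACIDS.contains amino_acid)
  let d := d.insert "negative" (NEGATIVE_AMINO_ACIDS.contains amino_acid)
  let d := d.insert "aliphatic" (ALIPHATIC_AMINO_ACIDS.contains amino_acid)
  let d := d.insert "hydroxy" (HYDROXY_AMINO_ACIDS.contains amino_acid)
  let d := d.insert "polar_uncharged"
    (POLAR_UNCHARGED_AMINO_ACIDS.contains amino_acid &&
      !(d.getD "positive" false) && !(d.getD "negative" false))
  let d := d.insert "charged" (d.getD "positive" false || d.getD "negative" false)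
  d

def classify_amino_acids_properties (protein_sequence : List Char) : List (PySem.Dict String Bool) :=
  protein_sequence.foldl (fun acc c => acc ++ [classifyOne c]) []

def get_position_property_frequency (sequences : List String) (max_length : Int) : List (String × List Int) :=
  let positions : PySem.Dict String (List Int) := PySem.Dict.mk
    [("hydrophobic", []), ("hydrophilic", []), ("aromatic", []), ("small", []),
     ("positive", []), ("negative", []), ("aliphatic", []), ("hydroxy", []),
     ("polar_uncharged", []), ("charged", [])]
  (sequences.foldl (fun pos g =>
    let properties := classify_amino_acids_properties g.toList
    (PySem.List.enumerate properties).foldl (fun pos iv =>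
      (PySem.Dict.keys iv.2).foldl (fun pos key =>
        if iv.2.getD key false then
          pos.modify key [] (fun l => l ++ [iv.1 + 1])
        else pos) pos) pos) positions).items

-- ===== PORT B =====
def pvSetDiff (a b : List Char) : List Char := a.filter (fun c => !(b.contains c))
def pvSetUnion (a b : List Char) : List Char := a ++ b.filter (fun c => !(a.contains c))

def pvPropertySets : List (String × List Char) :=
  [("hydrophobic", HYDROPHOBIC_AMINO_ACIDS),
   ("hydrophilic", HYDROPHILIC_AMINO_ACIDS),
   ("aromatic", AROMATIC_AMINO_ACIDS),
   ("small", SMALL_AMINO_ACIDS),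
   ("positive", POSITIVE_AMINO_ACIDS),
   ("negative", NEGATIVE_AMINO_ACIDS),
   ("aliphatic", ALIPHATIC_AMINO_ACIDS),
   ("hydroxy", HYDROXY_AMINO_ACIDS),
   ("polar_uncharged", pvSetDiff (pvSetDiff POLAR_UNCHARGED_AMINO_ACIDS POSITIVE_AMINO_ACIDS) NEGATIVE_AMINO_ACIDS),
   ("charged", pvSetUnion POSITIVE_AMINO_ACIDS NEGATIVE_AMINO_ACIDS)]

def get_position_property_frequency_alt (sequences : List String) (max_length : Int) : List (String × List Int) :=
  pvPropertySets.map (fun ks =>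
    (ks.1, sequences.flatMap (fun g =>
      (PySem.List.enumerate g.toList).filterMap (fun ic =>
        if ks.2.contains ic.2 then some (ic.1 + 1) else none))))

-- ===== PRECONDITION & SPEC =====
def Spec_get_position_property_frequency (sequences : List String) (max_length : Int) (out : List (String × List Int)) : Prop := out = get_position_property_frequency_alt sequences max_length
instance (sequences : List String) (max_length : Int) (out : List (String × List Int)) : Decidable (Spec_get_position_property_frequency sequences max_length out) := by unfold Spec_get_position_property_frequency; infer_instance

-- ===== CLAIM (what is proved, stated in full; the proofs are below) =====
def Claim_equal_get_position_property_frequency : Prop := ∀ (sequences : List String) (max_length : Int), Dom_get_position_property_frequency sequences max_length → Spec_get_position_property_frequency sequences max_length (get_position_property_frequency sequences max_length)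

-- ===== LEMMAS AND PROOFS =====

-- A's positions dict always has this shape
def mk10 (l1 l2 l3 l4 l5 l6 l7 l8 l9 l10 : List Int) : PySem.Dict String (List Int) :=
  PySem.Dict.mk
    [("hydrophobic", l1), ("hydrophilic", l2), ("aromatic", l3), ("small", l4),
     ("positive", l5), ("negative", l6), ("aliphatic", l7), ("hydroxy", l8),
     ("polar_uncharged", l9), ("charged", l10)]

-- A's boolean for each of the ten keys
def P1 (c : Char) : Bool := HYDROPHOBIC_AMINO_ACIDS.contains c
def P2 (c : Char) : Bool := HYDROPHILIC_AMINO_ACIDS.contains c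
def P3 (c : Char) : Bool := AROMATIC_AMINO_ACIDS.contains c
def P4 (c : Char) : Bool := SMALL_AMINO_ACIDS.contains c
def P5 (c : Char) : Bool := POSITIVE_AMINO_ACIDS.contains c
def P6 (c : Char) : Bool := NEGATIVE_AMINO_ACIDS.contains c
def P7 (c : Char) : Bool := ALIPHATIC_AMINO_ACIDS.contains c
def P8 (c : Char) : Bool := HYDROXY_AMINO_ACIDS.contains c
def P9 (c : Char) : Bool := POLAR_UNCHARGED_AMINO_ACIDS.contains c && !(P5 c) && !(P6 c)
def P10 (c : Char) : Bool := P5 c || P6 c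

def ite1 (b : Bool) (n : Int) : List Int := if b then [n] else []

-- positions (1-based) within one enumerated residue list that satisfy P
def posOf (P : Char → Bool) (L : List (Int × Char)) : List Int :=
  L.filterMap (fun ic => if P ic.2 then some (ic.1 + 1) else none)

theorem classifyOne_eq (c : Char) : classifyOne c = PySem.Dict.mk
    [("hydrophobic", P1 c), ("hydrophilic", P2 c), ("aromatic", P3 c), ("small", P4 c),
     ("positive", P5 c), ("negative", P6 c), ("aliphatic", P7 c), ("hydroxy", P8 c),
     ("polar_uncharged", P9 c), ("charged", P10 c)] := by
  simp [classifyOne, PySem.Dict.insert, PySem.Dict.empty, PySem.Dict.getD, PySem.Dict.get?,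
    PySem.Dict.contains, P1, P2, P3, P4, P5, P6, P7, P8, P9, P10]

theorem keysClassify (c : Char) : (classifyOne c).keys =
    ["hydrophobic","hydrophilic","aromatic","small","positive","negative","aliphatic","hydroxy","polar_uncharged","charged"] := by
  rw [classifyOne_eq]; simp

theorem getD_1 (c : Char) : (classifyOne c).getD "hydrophobic" false = P1 c := by
  rw [classifyOne_eq]; simp [PySem.Dict.getD, PySem.Dict.get?]

theorem mod_1 (f : List Int → List Int) (l1 l2 l3 l4 l5 l6 l7 l8 l9 l10 : List Int) :
    (mk10 l1 l2 l3 l4 l5 l6 l7 l8 l9 l10).modify "hydrophobic" [] f = mk10 (f l1) l2 l3 l4 l5 l6 l7 l8 l9 l10 := by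
  simp [mk10, PySem.Dict.modify, PySem.Dict.getD, PySem.Dict.get?, PySem.Dict.insert, PySem.Dict.contains]

theorem step_1 (b : Bool) (m : Int) (l1 l2 l3 l4 l5 l6 l7 l8 l9 l10 : List Int) :
    (if b then (mk10 l1 l2 l3 l4 l5 l6 l7 l8 l9 l10).modify "hydrophobic" [] (fun l => l ++ [m]) else mk10 l1 l2 l3 l4 l5 l6 l7 l8 l9 l10)
    = mk10 (l1 ++ ite1 b m) l2 l3 l4 l5 l6 l7 l8 l9 l10 := by
  cases b <;> simp [mod_1, ite1]

theorem getD_2 (c : Char) : (classifyOne c).getD "hydrophilic" false = P2 c := by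
  rw [classifyOne_eq]; simp [PySem.Dict.getD, PySem.Dict.get?]

theorem mod_2 (f : List Int → List Int) (l1 l2 l3 l4 l5 l6 l7 l8 l9 l10 : List Int) :
    (mk10 l1 l2 l3 l4 l5 l6 l7 l8 l9 l10).modify "hydrophilic" [] f = mk10 l1 (f l2) l3 l4 l5 l6 l7 l8 l9 l10 := by
  simp [mk10, PySem.Dict.modify, PySem.Dict.getD, PySem.Dict.get?, PySem.Dict.insert, PySem.Dict.contains]

theorem step_2 (b : Bool) (m : Int) (l1 l2 l3 l4 l5 l6 l7 l8 l9 l10 : List Int) :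
    (if b then (mk10 l1 l2 l3 l4 l5 l6 l7 l8 l9 l10).modify "hydrophilic" [] (fun l => l ++ [m]) else mk10 l1 l2 l3 l4 l5 l6 l7 l8 l9 l10)
    = mk10 l1 (l2 ++ ite1 b m) l3 l4 l5 l6 l7 l8 l9 l10 := by
  cases b <;> simp [mod_2, ite1]

theorem getD_3 (c : Char) : (classifyOne c).getD "aromatic" false = P3 c := by
  rw [classifyOne_eq]; simp [PySem.Dict.getD, PySem.Dict.get?]

theorem mod_3 (f : List Int → List Int) (l1 l2 l3 l4 l5 l6 l7 l8 l9 l10 : List Int) :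
    (mk10 l1 l2 l3 l4 l5 l6 l7 l8 l9 l10).modify "aromatic" [] f = mk10 l1 l2 (f l3) l4 l5 l6 l7 l8 l9 l10 := by
  simp [mk10, PySem.Dict.modify, PySem.Dict.getD, PySem.Dict.get?, PySem.Dict.insert, PySem.Dict.contains]

theorem step_3 (b : Bool) (m : Int) (l1 l2 l3 l4 l5 l6 l7 l8 l9 l10 : List Int) :
    (if b then (mk10 l1 l2 l3 l4 l5 l6 l7 l8 l9 l10).modify "aromatic" [] (fun l => l ++ [m]) else mk10 l1 l2 l3 l4 l5 l6 l7 l8 l9 l10)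
    = mk10 l1 l2 (l3 ++ ite1 b m) l4 l5 l6 l7 l8 l9 l10 := by
  cases b <;> simp [mod_3, ite1]

theorem getD_4 (c : Char) : (classifyOne c).getD "small" false = P4 c := by
  rw [classifyOne_eq]; simp [PySem.Dict.getD, PySem.Dict.get?]

theorem mod_4 (f : List Int → List Int) (l1 l2 l3 l4 l5 l6 l7 l8 l9 l10 : List Int) :
    (mk10 l1 l2 l3 l4 l5 l6 l7 l8 l9 l10).modify "small" [] f = mk10 l1 l2 l3 (f l4) l5 l6 l7 l8 l9 l10 := by
  simp [mk10, PySem.Dict.modify, PySem.Dict.getD, PySem.Dict.get?, PySem.Dict.insert, PySem.Dict.contains]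

theorem step_4 (b : Bool) (m : Int) (l1 l2 l3 l4 l5 l6 l7 l8 l9 l10 : List Int) :
    (if b then (mk10 l1 l2 l3 l4 l5 l6 l7 l8 l9 l10).modify "small" [] (fun l => l ++ [m]) else mk10 l1 l2 l3 l4 l5 l6 l7 l8 l9 l10)
    = mk10 l1 l2 l3 (l4 ++ ite1 b m) l5 l6 l7 l8 l9 l10 := by
  cases b <;> simp [mod_4, ite1]

theorem getD_5 (c : Char) : (classifyOne c).getD "positive" false = P5 c := by
  rw [classifyOne_eq]; simp [PySem.Dict.getD, PySem.Dict.get?]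

theorem mod_5 (f : List Int → List Int) (l1 l2 l3 l4 l5 l6 l7 l8 l9 l10 : List Int) :
    (mk10 l1 l2 l3 l4 l5 l6 l7 l8 l9 l10).modify "positive" [] f = mk10 l1 l2 l3 l4 (f l5) l6 l7 l8 l9 l10 := by
  simp [mk10, PySem.Dict.modify, PySem.Dict.getD, PySem.Dict.get?, PySem.Dict.insert, PySem.Dict.contains]

theorem step_5 (b : Bool) (m : Int) (l1 l2 l3 l4 l5 l6 l7 l8 l9 l10 : List Int) :
    (if b then (mk10 l1 l2 l3 l4 l5 l6 l7 l8 l9 l10).modify "positive" [] (fun l => l ++ [m]) else mk10 l1 l2 l3 l4 l5 l6 l7 l8 l9 l10)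
    = mk10 l1 l2 l3 l4 (l5 ++ ite1 b m) l6 l7 l8 l9 l10 := by
  cases b <;> simp [mod_5, ite1]

theorem getD_6 (c : Char) : (classifyOne c).getD "negative" false = P6 c := by
  rw [classifyOne_eq]; simp [PySem.Dict.getD, PySem.Dict.get?]

theorem mod_6 (f : List Int → List Int) (l1 l2 l3 l4 l5 l6 l7 l8 l9 l10 : List Int) :
    (mk10 l1 l2 l3 l4 l5 l6 l7 l8 l9 l10).modify "negative" [] f = mk10 l1 l2 l3 l4 l5 (f l6) l7 l8 l9 l10 := by
  simp [mk10, PySem.Dict.modify, PySem.Dict.getD, PySem.Dict.get?, PySem.Dict.insert, PySem.Dict.contains]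

theorem step_6 (b : Bool) (m : Int) (l1 l2 l3 l4 l5 l6 l7 l8 l9 l10 : List Int) :
    (if b then (mk10 l1 l2 l3 l4 l5 l6 l7 l8 l9 l10).modify "negative" [] (fun l => l ++ [m]) else mk10 l1 l2 l3 l4 l5 l6 l7 l8 l9 l10)
    = mk10 l1 l2 l3 l4 l5 (l6 ++ ite1 b m) l7 l8 l9 l10 := by
  cases b <;> simp [mod_6, ite1]

theorem getD_7 (c : Char) : (classifyOne c).getD "aliphatic" false = P7 c := by
  rw [classifyOne_eq]; simp [PySem.Dict.getD, PySem.Dict.get?]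

theorem mod_7 (f : List Int → List Int) (l1 l2 l3 l4 l5 l6 l7 l8 l9 l10 : List Int) :
    (mk10 l1 l2 l3 l4 l5 l6 l7 l8 l9 l10).modify "aliphatic" [] f = mk10 l1 l2 l3 l4 l5 l6 (f l7) l8 l9 l10 := by
  simp [mk10, PySem.Dict.modify, PySem.Dict.getD, PySem.Dict.get?, PySem.Dict.insert, PySem.Dict.contains]

theorem step_7 (b : Bool) (m : Int) (l1 l2 l3 l4 l5 l6 l7 l8 l9 l10 : List Int) :
    (if b then (mk10 l1 l2 l3 l4 l5 l6 l7 l8 l9 l10).modify "aliphatic" [] (fun l => l ++ [m]) else mk10 l1 l2 l3 l4 l5 l6 l7 l8 l9 l10)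
    = mk10 l1 l2 l3 l4 l5 l6 (l7 ++ ite1 b m) l8 l9 l10 := by
  cases b <;> simp [mod_7, ite1]

theorem getD_8 (c : Char) : (classifyOne c).getD "hydroxy" false = P8 c := by
  rw [classifyOne_eq]; simp [PySem.Dict.getD, PySem.Dict.get?]

theorem mod_8 (f : List Int → List Int) (l1 l2 l3 l4 l5 l6 l7 l8 l9 l10 : List Int) :
    (mk10 l1 l2 l3 l4 l5 l6 l7 l8 l9 l10).modify "hydroxy" [] f = mk10 l1 l2 l3 l4 l5 l6 l7 (f l8) l9 l10 := by
  simp [mk10, PySem.Dict.modify, PySem.Dict.getD, PySem.Dict.get?, PySem.Dict.insert, PySem.Dict.contains]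

theorem step_8 (b : Bool) (m : Int) (l1 l2 l3 l4 l5 l6 l7 l8 l9 l10 : List Int) :
    (if b then (mk10 l1 l2 l3 l4 l5 l6 l7 l8 l9 l10).modify "hydroxy" [] (fun l => l ++ [m]) else mk10 l1 l2 l3 l4 l5 l6 l7 l8 l9 l10)
    = mk10 l1 l2 l3 l4 l5 l6 l7 (l8 ++ ite1 b m) l9 l10 := by
  cases b <;> simp [mod_8, ite1]

theorem getD_9 (c : Char) : (classifyOne c).getD "polar_uncharged" false = P9 c := by
  rw [classifyOne_eq]; simp [PySem.Dict.getD, PySem.Dict.get?]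

theorem mod_9 (f : List Int → List Int) (l1 l2 l3 l4 l5 l6 l7 l8 l9 l10 : List Int) :
    (mk10 l1 l2 l3 l4 l5 l6 l7 l8 l9 l10).modify "polar_uncharged" [] f = mk10 l1 l2 l3 l4 l5 l6 l7 l8 (f l9) l10 := by
  simp [mk10, PySem.Dict.modify, PySem.Dict.getD, PySem.Dict.get?, PySem.Dict.insert, PySem.Dict.contains]

theorem step_9 (b : Bool) (m : Int) (l1 l2 l3 l4 l5 l6 l7 l8 l9 l10 : List Int) :
    (if b then (mk10 l1 l2 l3 l4 l5 l6 l7 l8 l9 l10).modify "polar_uncharged" [] (fun l => l ++ [m]) else mk10 l1 l2 l3 l4 l5 l6 l7 l8 l9 l10)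
    = mk10 l1 l2 l3 l4 l5 l6 l7 l8 (l9 ++ ite1 b m) l10 := by
  cases b <;> simp [mod_9, ite1]

theorem getD_10 (c : Char) : (classifyOne c).getD "charged" false = P10 c := by
  rw [classifyOne_eq]; simp [PySem.Dict.getD, PySem.Dict.get?]

theorem mod_10 (f : List Int → List Int) (l1 l2 l3 l4 l5 l6 l7 l8 l9 l10 : List Int) :
    (mk10 l1 l2 l3 l4 l5 l6 l7 l8 l9 l10).modify "charged" [] f = mk10 l1 l2 l3 l4 l5 l6 l7 l8 l9 (f l10) := by
  simp [mk10, PySem.Dict.modify, PySem.Dict.getD, PySem.Dict.get?, PySem.Dict.insert, PySem.Dict.contains]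

theorem step_10 (b : Bool) (m : Int) (l1 l2 l3 l4 l5 l6 l7 l8 l9 l10 : List Int) :
    (if b then (mk10 l1 l2 l3 l4 l5 l6 l7 l8 l9 l10).modify "charged" [] (fun l => l ++ [m]) else mk10 l1 l2 l3 l4 l5 l6 l7 l8 l9 l10)
    = mk10 l1 l2 l3 l4 l5 l6 l7 l8 l9 (l10 ++ ite1 b m) := by
  cases b <;> simp [mod_10, ite1]

theorem charStep (c : Char) (n : Int) (l1 l2 l3 l4 l5 l6 l7 l8 l9 l10 : List Int) :
    ((classifyOne c).keys).foldl (fun pos key =>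
        if (classifyOne c).getD key false then
          pos.modify key [] (fun l => l ++ [n + 1])
        else pos) (mk10 l1 l2 l3 l4 l5 l6 l7 l8 l9 l10)
    = mk10 (l1 ++ ite1 (P1 c) (n+1)) (l2 ++ ite1 (P2 c) (n+1)) (l3 ++ ite1 (P3 c) (n+1))
        (l4 ++ ite1 (P4 c) (n+1)) (l5 ++ ite1 (P5 c) (n+1)) (l6 ++ ite1 (P6 c) (n+1))
        (l7 ++ ite1 (P7 c) (n+1)) (l8 ++ ite1 (P8 c) (n+1)) (l9 ++ ite1 (P9 c) (n+1))
        (l10 ++ ite1 (P10 c) (n+1)) := by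
  rw [keysClassify]
  simp only [List.foldl_cons, List.foldl_nil,
    getD_1, getD_2, getD_3, getD_4, getD_5, getD_6, getD_7, getD_8, getD_9, getD_10,
    step_1, step_2, step_3, step_4, step_5, step_6, step_7, step_8, step_9, step_10]

theorem ite1_posOf_cons (P : Char → Bool) (ic : Int × Char) (L : List (Int × Char)) :
    ite1 (P ic.2) (ic.1 + 1) ++ posOf P L = posOf P (ic :: L) := by
  cases h : P ic.2 <;> simp [posOf, ite1, h]

theorem enumerate_map {α β : Type} (f : α → β) (xs : List α) (s : Int) :
    PySem.List.enumerate (xs.map f) s = (PySem.List.enumerate xs s).map (fun p => (p.1, f p.2)) := by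
  induction xs generalizing s with
  | nil => simp [PySem.List.enumerate_nil]
  | cons x xs ih => simp [PySem.List.enumerate_cons, ih]

theorem seqFold (L : List (Int × Char)) :
    ∀ l1 l2 l3 l4 l5 l6 l7 l8 l9 l10 : List Int,
    L.foldl (fun pos ic =>
      ((classifyOne ic.2).keys).foldl (fun pos key =>
        if (classifyOne ic.2).getD key false then
          pos.modify key [] (fun l => l ++ [ic.1 + 1])
        else pos) pos) (mk10 l1 l2 l3 l4 l5 l6 l7 l8 l9 l10)
    = mk10 (l1 ++ posOf P1 L) (l2 ++ posOf P2 L) (l3 ++ posOf P3 L) (l4 ++ posOf P4 L)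
        (l5 ++ posOf P5 L) (l6 ++ posOf P6 L) (l7 ++ posOf P7 L) (l8 ++ posOf P8 L)
        (l9 ++ posOf P9 L) (l10 ++ posOf P10 L) := by
  induction L with
  | nil => intro l1 l2 l3 l4 l5 l6 l7 l8 l9 l10; simp [posOf]
  | cons ic L ih =>
    intro l1 l2 l3 l4 l5 l6 l7 l8 l9 l10
    rw [List.foldl_cons, charStep, ih]
    simp only [List.append_assoc, ite1_posOf_cons]

set_option maxHeartbeats 1000000 in
theorem perSeq (g : List Char) (l1 l2 l3 l4 l5 l6 l7 l8 l9 l10 : List Int) :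
    (PySem.List.enumerate (classify_amino_acids_properties g)).foldl (fun pos iv =>
      (PySem.Dict.keys iv.2).foldl (fun pos key =>
        if iv.2.getD key false then
          pos.modify key [] (fun l => l ++ [iv.1 + 1])
        else pos) pos) (mk10 l1 l2 l3 l4 l5 l6 l7 l8 l9 l10)
    = mk10 (l1 ++ posOf P1 (PySem.List.enumerate g)) (l2 ++ posOf P2 (PySem.List.enumerate g))
        (l3 ++ posOf P3 (PySem.List.enumerate g)) (l4 ++ posOf P4 (PySem.List.enumerate g))
        (l5 ++ posOf P5 (PySem.List.enumerate g)) (l6 ++ posOf P6 (PySem.List.enumerate g))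
        (l7 ++ posOf P7 (PySem.List.enumerate g)) (l8 ++ posOf P8 (PySem.List.enumerate g))
        (l9 ++ posOf P9 (PySem.List.enumerate g)) (l10 ++ posOf P10 (PySem.List.enumerate g)) := by
  have hmap : classify_amino_acids_properties g = g.map classifyOne := by
    unfold classify_amino_acids_properties
    rw [PySem.List.foldl_append_singleton_eq_map]
    exact List.nil_append _
  rw [hmap, enumerate_map, List.foldl_map]
  simpa using seqFold (PySem.List.enumerate g) l1 l2 l3 l4 l5 l6 l7 l8 l9 l10

def posSeq (P : Char → Bool) (sequences : List String) : List Int :=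
  sequences.flatMap (fun g => posOf P (PySem.List.enumerate g.toList))

theorem mainFold (sequences : List String) :
    ∀ l1 l2 l3 l4 l5 l6 l7 l8 l9 l10 : List Int,
    (sequences.foldl (fun pos g =>
      (PySem.List.enumerate (classify_amino_acids_properties g.toList)).foldl (fun pos iv =>
        (PySem.Dict.keys iv.2).foldl (fun pos key =>
          if iv.2.getD key false then
            pos.modify key [] (fun l => l ++ [iv.1 + 1])
          else pos) pos) pos) (mk10 l1 l2 l3 l4 l5 l6 l7 l8 l9 l10))
    = mk10 (l1 ++ posSeq P1 sequences) (l2 ++ posSeq P2 sequences) (l3 ++ posSeq P3 sequences)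
        (l4 ++ posSeq P4 sequences) (l5 ++ posSeq P5 sequences) (l6 ++ posSeq P6 sequences)
        (l7 ++ posSeq P7 sequences) (l8 ++ posSeq P8 sequences) (l9 ++ posSeq P9 sequences)
        (l10 ++ posSeq P10 sequences) := by
  induction sequences with
  | nil => intro l1 l2 l3 l4 l5 l6 l7 l8 l9 l10; simp [posSeq]
  | cons g gs ih =>
    intro l1 l2 l3 l4 l5 l6 l7 l8 l9 l10
    rw [List.foldl_cons, perSeq, ih]
    simp [posSeq, List.append_assoc]

theorem polar_contains (c : Char) :
    (pvSetDiff (pvSetDiff POLAR_UNCHARGED_AMINO_ACIDS POSITIVE_AMINO_ACIDS) NEGATIVE_AMINO_ACIDS).contains c = P9 c := by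
  have h : pvSetDiff (pvSetDiff POLAR_UNCHARGED_AMINO_ACIDS POSITIVE_AMINO_ACIDS) NEGATIVE_AMINO_ACIDS
      = POLAR_UNCHARGED_AMINO_ACIDS := by decide
  rw [h, P9]
  cases hc : POLAR_UNCHARGED_AMINO_ACIDS.contains c
  · simp
  · simp only [Bool.true_and]
    simp only [POLAR_UNCHARGED_AMINO_ACIDS, List.contains_eq_mem, decide_eq_true_eq,
      List.mem_cons, List.not_mem_nil, or_false] at hc
    rcases hc with rfl | rfl | rfl | rfl | rfl <;> decide

theorem charged_contains (c : Char) :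
    (pvSetUnion POSITIVE_AMINO_ACIDS NEGATIVE_AMINO_ACIDS).contains c = P10 c := by
  have h : pvSetUnion POSITIVE_AMINO_ACIDS NEGATIVE_AMINO_ACIDS
      = POSITIVE_AMINO_ACIDS ++ NEGATIVE_AMINO_ACIDS := by decide
  rw [h, P10, P5, P6]
  simp [List.contains_eq_mem, POSITIVE_AMINO_ACIDS, NEGATIVE_AMINO_ACIDS, Bool.or_assoc]

theorem A_items (sequences : List String) (max_length : Int) :
    get_position_property_frequency sequences max_length
    = (sequences.foldl (fun pos g =>
        (PySem.List.enumerate (classify_amino_acids_properties g.toList)).foldl (fun pos iv =>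
          (PySem.Dict.keys iv.2).foldl (fun pos key =>
            if iv.2.getD key false then
              pos.modify key [] (fun l => l ++ [iv.1 + 1])
            else pos) pos) pos) (mk10 [] [] [] [] [] [] [] [] [] [])).items := rfl

theorem polar_mem (c : Char) :
    (c ∈ pvSetDiff (pvSetDiff POLAR_UNCHARGED_AMINO_ACIDS POSITIVE_AMINO_ACIDS) NEGATIVE_AMINO_ACIDS) ↔ P9 c = true := by
  rw [← polar_contains]; simp [List.contains_eq_mem]

theorem charged_mem (c : Char) :
    (c ∈ pvSetUnion POSITIVE_AMINO_ACIDS NEGATIVE_AMINO_ACIDS) ↔ P10 c = true := by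
  rw [← charged_contains]; simp [List.contains_eq_mem]

-- ===== VERDICT (by name: the statement is the Claim_ definition above) =====
theorem get_position_property_frequency_spec : Claim_equal_get_position_property_frequency := by
  intro sequences max_length _
  show get_position_property_frequency sequences max_length = _
  rw [A_items, mainFold]
  unfold get_position_property_frequency_alt pvPropertySets
  simp only [List.map_cons, List.map_nil, mk10, List.nil_append]
  simp [posSeq, posOf, polar_mem, charged_mem, P1, P2, P3, P4, P5, P6, P7, P8]
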